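-- pv_equiv track=rewrite | github.com/next-mmo/pocketpaw- | src/pocketpaw/bus/commands.py | _resolve_todo_index
-- ===== SOURCE A (Python) =====
-- def _resolve_todo_index(
--     todos: list[dict[str, object]], selector: str
-- ) -> tuple[int | None, str | None]:
--     choice = selector.strip()
--     if not choice:
--         return None, "Choose a todo by number, for example `/todo done 1`."
--
--     if choice.isdigit():
--         index = int(choice) - 1
--         if 0 <= index < len(todos):
--             return index, None
--         return None, f"Todo #{choice} does not exist."
--
--     lowered = choice.casefold()
--     exact_matches = [
--         index
--         for index, todo in enumerate(todos)
--         if str(todo["id"]).casefold() == lowered or str(todo["text"]).casefold() == lowered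
--     ]
--     if len(exact_matches) == 1:
--         return exact_matches[0], None
--     if len(exact_matches) > 1:
--         return None, "More than one todo matches that text. Use the list number instead."
--
--     partial_matches = [
--         index for index, todo in enumerate(todos) if lowered in str(todo["text"]).casefold()
--     ]
--     if len(partial_matches) == 1:
--         return partial_matches[0], None
--     if len(partial_matches) > 1:
--         return None, "More than one todo matches that text. Use the list number instead."
--
--     return None, f'No todo matching "{choice}" was found.'
-- ===== SOURCE B (Python) =====
-- def _resolve_todo_index(
--     todos: list[dict[str, object]], selector: str
-- ) -> tuple[int | None, str | None]:
--     choice = selector.strip()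
--     if not choice:
--         return None, "Choose a todo by number, for example `/todo done 1`."
--
--     if choice.isdigit():
--         index = int(choice) - 1
--         if 0 <= index < len(todos):
--             return index, None
--         return None, f"Todo #{choice} does not exist."
--
--     lowered = choice.casefold()
--
--     # reverse index: casefolded id/text -> set of todo indices; exact match is a
--     # single hash lookup instead of a filtering scan
--     index_of: dict[str, set[int]] = {}
--     for i, todo in enumerate(todos):
--         index_of.setdefault(str(todo["id"]).casefold(), set()).add(i)
--         index_of.setdefault(str(todo["text"]).casefold(), set()).add(i)
--
--     hits = index_of.get(lowered)
--     if hits is not None: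
--         if len(hits) == 1:
--             return min(hits), None
--         return None, "More than one todo matches that text. Use the list number instead."
--
--     # substring phase: short-circuit scan that stops as soon as a second
--     # candidate is seen (never materialises the full match list)
--     first: int | None = None
--     for i, todo in enumerate(todos):
--         if lowered in str(todo["text"]).casefold():
--             if first is not None:
--                 return None, "More than one todo matches that text. Use the list number instead."
--             first = i
--     if first is not None:
--         return first, None
--     return None, f'No todo matching "{choice}" was found.'
-- ===== Notes on version B (the rewrite author's own statement) =====
-- stated objective: alternative
-- what changed: B replaces A's two filtering scans with a different strategy: it builds a reverse index (dict mapping each casefolded id/text to the set of todo indices) so the exact phase is a single hash lookup, and resolves the substring phase with a short-circuit scan that returns as soon as a second candidate is seen instead of materialising and counting a match list.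
-- outside the precondition, e.g. on _resolve_todo_index([{'id': 'a'}], 'A'): A returns (0, None), B raises KeyError; on _resolve_todo_index([{'text': 'x'}], 'q'): A raises KeyError, B raises KeyError
import Mathlib
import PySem

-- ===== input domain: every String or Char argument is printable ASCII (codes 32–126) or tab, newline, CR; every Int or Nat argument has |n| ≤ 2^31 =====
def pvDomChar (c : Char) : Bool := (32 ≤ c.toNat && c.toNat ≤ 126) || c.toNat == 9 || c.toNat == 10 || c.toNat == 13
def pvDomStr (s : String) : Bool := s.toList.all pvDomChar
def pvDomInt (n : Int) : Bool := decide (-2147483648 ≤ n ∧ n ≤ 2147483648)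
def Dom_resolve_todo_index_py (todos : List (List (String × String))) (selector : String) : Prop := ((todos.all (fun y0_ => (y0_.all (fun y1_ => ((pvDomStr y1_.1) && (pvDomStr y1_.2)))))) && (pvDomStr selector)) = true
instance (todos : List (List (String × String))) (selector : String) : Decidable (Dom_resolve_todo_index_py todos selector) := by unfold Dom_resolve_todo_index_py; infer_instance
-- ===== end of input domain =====

-- B resolves the exact phase through a reverse index (dict: casefolded id/text -> set of
-- indices, one hash lookup) and the substring phase by a short-circuit scan that stops at a
-- second candidate, instead of A's two filter-and-count scans (objective: alternative).

-- ===== PORT A =====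
-- todo[k] (dict access, first match in the association list); KeyError excluded by Pre_
def pyGetStr (d : List (String × String)) (k : String) : String :=
  ((d.find? (fun p => p.1 == k)).map (·.2)).getD ""

def resolve_todo_index_py (todos : List (List (String × String))) (selector : String) : Option Int × Option String :=
  let choice := PySem.Str.strip selector
  if choice = "" then
    (none, some "Choose a todo by number, for example `/todo done 1`.")
  else if PySem.Str.strIsdigit choice then
    let index := (PySem.Int.ofStr? choice).getD 0 - 1   -- ofStr? is some: choice is all digits
    if 0 ≤ index ∧ index < todos.length then (some index, none)
    else (none, some ("Todo #" ++ choice ++ " does not exist."))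
  else
    let lowered := PySem.Str.lower choice   -- casefold = lower on the ASCII domain
    let exact_matches :=
      ((PySem.List.enumerate todos).filter (fun p =>
        PySem.Str.lower (pyGetStr p.2 "id") == lowered ||
        PySem.Str.lower (pyGetStr p.2 "text") == lowered)).map (·.1)
    if exact_matches.length = 1 then (some (exact_matches.headD 0), none)
    else if exact_matches.length > 1 then
      (none, some "More than one todo matches that text. Use the list number instead.")
    else
      let partial_matches :=
        ((PySem.List.enumerate todos).filter (fun p =>
          PySem.Str.isIn lowered (PySem.Str.lower (pyGetStr p.2 "text")))).map (·.1)
      if partial_matches.length = 1 then (some (partial_matches.headD 0), none)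
      else if partial_matches.length > 1 then
        (none, some "More than one todo matches that text. Use the list number instead.")
      else (none, some ("No todo matching \"" ++ choice ++ "\" was found."))

-- ===== PORT B =====
-- index_of.setdefault(key, set()).add(i)  ==  d[key] = d.get(key, set()) ∪ {i}  ==  Dict.modify
def idxStep (d : PySem.Dict String (PySem.Set Int)) (p : Int × List (String × String)) :
    PySem.Dict String (PySem.Set Int) :=
  let d1 := d.modify (PySem.Str.lower (pyGetStr p.2 "id")) PySem.Set.empty
              (fun s => PySem.Set.add s p.1)
  d1.modify (PySem.Str.lower (pyGetStr p.2 "text")) PySem.Set.empty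
              (fun s => PySem.Set.add s p.1)

-- the short-circuit substring scan ('first' accumulator; returns on a second hit)
def scanPartial (lowered choice : String) :
    List (Int × List (String × String)) → Option Int → Option Int × Option String
  | [], none => (none, some ("No todo matching \"" ++ choice ++ "\" was found."))
  | [], some f => (some f, none)
  | p :: rest, first =>
    if PySem.Str.isIn lowered (PySem.Str.lower (pyGetStr p.2 "text")) then
      match first with
      | some _ => (none, some "More than one todo matches that text. Use the list number instead.")
      | none => scanPartial lowered choice rest (some p.1)
    else scanPartial lowered choice rest first

def resolve_todo_index_py_alt (todos : List (List (String × String))) (selector : String) : Option Int × Option String :=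
  let choice := PySem.Str.strip selector
  if choice = "" then
    (none, some "Choose a todo by number, for example `/todo done 1`.")
  else if PySem.Str.strIsdigit choice then
    let index := (PySem.Int.ofStr? choice).getD 0 - 1
    if 0 ≤ index ∧ index < todos.length then (some index, none)
    else (none, some ("Todo #" ++ choice ++ " does not exist."))
  else
    let lowered := PySem.Str.lower choice
    let index_of := (PySem.List.enumerate todos).foldl idxStep PySem.Dict.empty
    match index_of.get? lowered with
    | some hits =>
      if hits.length = 1 then (some ((PySem.List.min? hits (fun x => x)).getD 0), none)
      else (none, some "More than one todo matches that text. Use the list number instead.")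
    | none => scanPartial lowered choice (PySem.List.enumerate todos) none

-- ===== PRECONDITION & SPEC =====
-- Pre_ excludes the inputs where a non-empty, non-digit selector meets a todo missing the
-- "id" or "text" key: there A raises KeyError or returns only by `or`-short-circuiting past
-- the missing key, and B (which reads both keys of every todo to build its index) raises.
def Pre_resolve_todo_index_py (todos : List (List (String × String))) (selector : String) : Prop :=
  PySem.Str.strip selector = "" ∨ PySem.Str.strIsdigit (PySem.Str.strip selector) = true ∨
    ∀ todo ∈ todos, todo.any (fun p => p.1 == "id") = true ∧ todo.any (fun p => p.1 == "text") = true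

instance (todos : List (List (String × String))) (selector : String) : Decidable (Pre_resolve_todo_index_py todos selector) := by
  unfold Pre_resolve_todo_index_py; infer_instance

def pvWitness_resolve_todo_index_py : (List (List (String × String))) × String :=
  ([[("id", "a1"), ("text", "Buy milk")], [("id", "a2"), ("text", "Walk dog")]], "milk")

def Spec_resolve_todo_index_py (todos : List (List (String × String))) (selector : String) (out : Option Int × Option String) : Prop := out = resolve_todo_index_py_alt todos selector
instance (todos : List (List (String × String))) (selector : String) (out : Option Int × Option String) : Decidable (Spec_resolve_todo_index_py todos selector out) := by unfold Spec_resolve_todo_index_py; infer_instance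

-- ===== CLAIM (what is proved, stated in full; the proofs are below) =====
def Claim_equal_resolve_todo_index_py : Prop := ∀ (todos : List (List (String × String))) (selector : String), Dom_resolve_todo_index_py todos selector → Pre_resolve_todo_index_py todos selector → Spec_resolve_todo_index_py todos selector (resolve_todo_index_py todos selector)

-- ===== LEMMAS AND PROOFS =====

-- the reverse-index fold: the entry at k collects, in order, exactly the indices of
-- todos whose casefolded id or text equals k
theorem fold_idxStep_getD (l : List (Int × List (String × String)))
    (d : PySem.Dict String (PySem.Set Int)) (k : String)
    (hd : ∀ p ∈ l, p.1 ∉ d.getD k PySem.Set.empty)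
    (hl : l.Pairwise (fun p q => p.1 ≠ q.1)) :
    (l.foldl idxStep d).getD k PySem.Set.empty =
      d.getD k PySem.Set.empty ++
        (l.filter (fun p =>
          PySem.Str.lower (pyGetStr p.2 "id") == k ||
          PySem.Str.lower (pyGetStr p.2 "text") == k)).map (·.1) := by
  induction l generalizing d with
  | nil => simp
  | cons p tl ih =>
    have hpd : p.1 ∉ d.getD k PySem.Set.empty := hd p (by simp)
    simp only [PySem.Set.empty] at hpd
    have hstep : (idxStep d p).getD k PySem.Set.empty =
        d.getD k PySem.Set.empty ++
          (if (PySem.Str.lower (pyGetStr p.2 "id") == k ||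
               PySem.Str.lower (pyGetStr p.2 "text") == k) then [p.1] else []) := by
      by_cases e1 : PySem.Str.lower (pyGetStr p.2 "id") = k <;>
        by_cases e2 : PySem.Str.lower (pyGetStr p.2 "text") = k
      · simp [idxStep, e1, e2, PySem.Set.add, PySem.Set.empty, hpd]
      · have e2' : ¬ (k = PySem.Str.lower (pyGetStr p.2 "text")) := fun h => e2 h.symm
        simp [idxStep, PySem.Dict.getD_modify, e1, e2', PySem.Set.add, PySem.Set.empty, hpd]
      · have e1' : ¬ (k = PySem.Str.lower (pyGetStr p.2 "id")) := fun h => e1 h.symm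
        simp [idxStep, PySem.Dict.getD_modify, e1', e2, PySem.Set.add, PySem.Set.empty, hpd]
      · have e1' : ¬ (k = PySem.Str.lower (pyGetStr p.2 "id")) := fun h => e1 h.symm
        have e2' : ¬ (k = PySem.Str.lower (pyGetStr p.2 "text")) := fun h => e2 h.symm
        simp [idxStep, PySem.Dict.getD_modify, e1, e1', e2, e2', PySem.Set.empty]
    simp only [List.foldl_cons, List.filter_cons]
    rw [ih (idxStep d p) ?_ hl.tail, hstep]
    · by_cases hp : (PySem.Str.lower (pyGetStr p.2 "id") == k ||
          PySem.Str.lower (pyGetStr p.2 "text") == k) = true <;> simp [hp]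
    · intro q hq
      rw [hstep]
      have hq1 : q.1 ∉ d.getD k PySem.Set.empty := hd q (by simp [hq])
      have hq2 : ¬ q.1 = p.1 := fun h => (List.pairwise_cons.mp hl).1 q hq h.symm
      simp [PySem.Set.empty] at hq1
      simp [PySem.Set.empty, hq1, hq2]

theorem fold_idxStep_contains (l : List (Int × List (String × String)))
    (d : PySem.Dict String (PySem.Set Int)) (k : String) :
    (l.foldl idxStep d).contains k =
      (d.contains k || l.any (fun p =>
        PySem.Str.lower (pyGetStr p.2 "id") == k ||
        PySem.Str.lower (pyGetStr p.2 "text") == k)) := by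
  induction l generalizing d with
  | nil => simp
  | cons p tl ih =>
    simp only [List.foldl_cons, List.any_cons, ih, idxStep, PySem.Dict.contains_modify]
    by_cases e1 : PySem.Str.lower (pyGetStr p.2 "id") = k <;>
      by_cases e2 : PySem.Str.lower (pyGetStr p.2 "text") = k
    · simp [e1, e2]
    · have e2' : ¬ (k = PySem.Str.lower (pyGetStr p.2 "text")) := fun h => e2 h.symm
      simp [e1]
    · have e1' : ¬ (k = PySem.Str.lower (pyGetStr p.2 "id")) := fun h => e1 h.symm
      simp [e2]
    · have b1 : (k == PySem.Str.lower (pyGetStr p.2 "id")) = false := by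
        simpa using fun h => e1 h.symm
      have b2 : (k == PySem.Str.lower (pyGetStr p.2 "text")) = false := by
        simpa using fun h => e2 h.symm
      have b3 : (PySem.Str.lower (pyGetStr p.2 "id") == k) = false := by simpa using e1
      have b4 : (PySem.Str.lower (pyGetStr p.2 "text") == k) = false := by simpa using e2
      simp [b1, b2, b3, b4]

-- the short-circuit scan is determined by first.toList ++ the filtered match list
theorem scanPartial_spec (lowered choice : String)
    (l : List (Int × List (String × String))) (first : Option Int) :
    scanPartial lowered choice l first =
      match first.toList ++ (l.filter (fun p =>
          PySem.Str.isIn lowered (PySem.Str.lower (pyGetStr p.2 "text")))).map (·.1) with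
      | [] => (none, some ("No todo matching \"" ++ choice ++ "\" was found."))
      | [x] => (some x, none)
      | _ :: _ :: _ =>
          (none, some "More than one todo matches that text. Use the list number instead.") := by
  induction l generalizing first with
  | nil => cases first <;> simp [scanPartial]
  | cons p tl ih =>
    by_cases hp : PySem.Chars.isIn lowered.toList (PySem.Chars.lower (pyGetStr p.2 "text").toList) = true
    · cases first with
      | none =>
        have h1 : scanPartial lowered choice (p :: tl) none
            = scanPartial lowered choice tl (some p.1) := by simp [scanPartial, hp]
        rw [h1, ih (some p.1)]
        simp [hp]
      | some f =>
        have h1 : scanPartial lowered choice (p :: tl) (some f)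
            = (none, some "More than one todo matches that text. Use the list number instead.") := by
          simp [scanPartial, hp]
        rw [h1]
        simp [hp]
    · have h1 : scanPartial lowered choice (p :: tl) first
          = scanPartial lowered choice tl first := by simp [scanPartial, hp]
      rw [h1, ih first]
      simp [hp]

theorem resolve_todo_index_py_spec : Claim_equal_resolve_todo_index_py := by
  intro todos selector _hdom _hpre
  unfold Spec_resolve_todo_index_py resolve_todo_index_py resolve_todo_index_py_alt
  by_cases h1 : PySem.Str.strip selector = ""
  · simp [h1]
  by_cases h2 : PySem.Str.strIsdigit (PySem.Str.strip selector) = true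
  · simp only [if_neg h1, if_pos h2]
  simp only [if_neg h1, if_neg h2]
  have hpair : (PySem.List.enumerate todos).Pairwise (fun p q => p.1 ≠ q.1) :=
    (PySem.List.pairwise_lt_enumerate todos 0).imp (fun h => ne_of_lt h)
  have hget := fold_idxStep_getD (PySem.List.enumerate todos) PySem.Dict.empty
    (PySem.Str.lower (PySem.Str.strip selector)) (by simp) hpair
  have hcon := fold_idxStep_contains (PySem.List.enumerate todos) PySem.Dict.empty
    (PySem.Str.lower (PySem.Str.strip selector))
  simp only [PySem.Dict.getD_empty, PySem.Dict.contains_empty, PySem.Set.empty,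
    List.nil_append, Bool.false_or] at hget hcon
  by_cases hany : (PySem.List.enumerate todos).any (fun p =>
      PySem.Str.lower (pyGetStr p.2 "id") == PySem.Str.lower (PySem.Str.strip selector) ||
      PySem.Str.lower (pyGetStr p.2 "text") == PySem.Str.lower (PySem.Str.strip selector)) = true
  · -- exact hit(s): B's dict lookup returns exactly A's exact-match list
    have hcont : ((PySem.List.enumerate todos).foldl idxStep PySem.Dict.empty).contains
        (PySem.Str.lower (PySem.Str.strip selector)) = true := by rw [hcon, hany]
    have hsome : (((PySem.List.enumerate todos).foldl idxStep PySem.Dict.empty).get?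
        (PySem.Str.lower (PySem.Str.strip selector))).isSome = true := by
      rw [← PySem.Dict.contains_eq_isSome_get?]; exact hcont
    obtain ⟨v, hv⟩ := Option.isSome_iff_exists.mp hsome
    have hvE : v = ((PySem.List.enumerate todos).filter (fun p =>
        PySem.Str.lower (pyGetStr p.2 "id") == PySem.Str.lower (PySem.Str.strip selector) ||
        PySem.Str.lower (pyGetStr p.2 "text") == PySem.Str.lower (PySem.Str.strip selector))).map (·.1) := by
      rw [← hget, PySem.Dict.getD_eq_get?_getD, hv]; rfl
    have hne : ((PySem.List.enumerate todos).filter (fun p =>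
        PySem.Str.lower (pyGetStr p.2 "id") == PySem.Str.lower (PySem.Str.strip selector) ||
        PySem.Str.lower (pyGetStr p.2 "text") == PySem.Str.lower (PySem.Str.strip selector))).map (·.1) ≠ [] := by
      intro hnil
      rw [List.any_eq_true] at hany
      obtain ⟨p, hp, hpp⟩ := hany
      have := List.filter_eq_nil_iff.mp (List.map_eq_nil_iff.mp hnil) p hp
      simp_all
    simp only [hv, hvE]
    generalize hE : ((PySem.List.enumerate todos).filter (fun p =>
        PySem.Str.lower (pyGetStr p.2 "id") == PySem.Str.lower (PySem.Str.strip selector) ||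
        PySem.Str.lower (pyGetStr p.2 "text") == PySem.Str.lower (PySem.Str.strip selector))).map (·.1) = E
      at hne ⊢
    rcases E with _ | ⟨x, _ | ⟨y, tl⟩⟩
    · exact absurd rfl hne
    · simp [PySem.List.min?_id_cons]
    · simp
  · -- no exact hit: the dict has no entry; both fall to the substring phase
    have hcont : ((PySem.List.enumerate todos).foldl idxStep PySem.Dict.empty).contains
        (PySem.Str.lower (PySem.Str.strip selector)) = false := by
      rw [hcon]; simpa using hany
    have hnone := (PySem.Dict.get?_eq_none_iff_contains _ _).mpr hcont
    have hEnil : ((PySem.List.enumerate todos).filter (fun p =>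
        PySem.Str.lower (pyGetStr p.2 "id") == PySem.Str.lower (PySem.Str.strip selector) ||
        PySem.Str.lower (pyGetStr p.2 "text") == PySem.Str.lower (PySem.Str.strip selector))) = [] := by
      rw [List.filter_eq_nil_iff]
      intro p hp
      rw [List.any_eq_true] at hany
      exact fun h => hany ⟨p, hp, h⟩
    simp only [hnone, hEnil, List.map_nil, List.length_nil, scanPartial_spec,
      Option.toList_none, List.nil_append]
    generalize hP : ((PySem.List.enumerate todos).filter (fun p =>
        PySem.Str.isIn (PySem.Str.lower (PySem.Str.strip selector))
          (PySem.Str.lower (pyGetStr p.2 "text")))).map (·.1) = P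
    rcases P with _ | ⟨u, _ | ⟨w, tp⟩⟩ <;> simp
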